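-- pv_equiv track=rewrite | github.com/HashooSashoo/Python_Projects | graphics/graphics_helper_funcs.py | find_cycle_from_edge
-- ===== SOURCE A (Python) =====
-- def find_cycle_from_edge(u, v, parent):
--     """Trace cycle created by edge (u,v) in spanning tree"""
--     # Find path from u to root
--     path_u = []
--     current = u
--     while current is not None:
--         path_u.append(current)
--         current = parent[current]
--
--     # Find path from v to root
--     path_v = []
--     current = v
--     while current is not None:
--         path_v.append(current)
--         current = parent[current]
--
--     # Find lowest common ancestor (LCA)
--     set_u = set(path_u)
--     lca = None
--     for node in path_v:
--         if node in set_u: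
--             lca = node
--             break
--
--     # Build cycle: u -> lca -> v -> u
--     cycle = []
--     current = u
--     while current != lca:
--         cycle.append(current)
--         current = parent[current]
--     cycle.append(lca)
--
--     path_v_to_lca = []
--     current = v
--     while current != lca:
--         path_v_to_lca.append(current)
--         current = parent[current]
--
--     cycle.extend(reversed(path_v_to_lca))
--
--     return cycle
-- ===== SOURCE B (Python) =====
-- def find_cycle_from_edge(u, v, parent):
--     """Trace cycle created by edge (u,v) in spanning tree.
--
--     LCA by the two-pointer depth-equalization technique (the classic
--     linked-list-intersection trick): measure the depth of u and of v,
--     lift the deeper pointer until both depths match, then advance both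
--     pointers in lockstep until they coincide -- that node is the LCA.
--     No root paths are materialized and no set is built.  The cycle is
--     then the walk u->lca, the lca, and the reversed walk v->lca.
--     """
--     def depth(x):
--         d = 0
--         while x is not None:
--             d += 1
--             x = parent[x]
--         return d
--
--     du, dv = depth(u), depth(v)
--     a, b = u, v
--     for _ in range(du - dv):
--         a = parent[a]
--     for _ in range(dv - du):
--         b = parent[b]
--     while a != b:
--         a = parent[a]
--         b = parent[b]
--     lca = a
--
--     left = []
--     cur = u
--     while cur != lca:
--         left.append(cur)
--         cur = parent[cur]
--
--     right = []
--     cur = v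
--     while cur != lca:
--         right.append(cur)
--         cur = parent[cur]
--
--     return left + [lca] + right[::-1]
-- ===== Notes on version B (the rewrite author's own statement) =====
-- stated objective: alternative
-- what changed: B finds the LCA with the two-pointer depth-equalization technique (measure both depths, lift the deeper endpoint, advance both pointers in lockstep until they meet) instead of A's materialized root paths, set and membership scan; no path lists or set are built to locate the LCA.
-- outside the precondition, e.g. on find_cycle_from_edge(0, 1, {0: None, 1: None}): A returns [0, None, 1], B returns [0, None, 1]
import Mathlib
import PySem

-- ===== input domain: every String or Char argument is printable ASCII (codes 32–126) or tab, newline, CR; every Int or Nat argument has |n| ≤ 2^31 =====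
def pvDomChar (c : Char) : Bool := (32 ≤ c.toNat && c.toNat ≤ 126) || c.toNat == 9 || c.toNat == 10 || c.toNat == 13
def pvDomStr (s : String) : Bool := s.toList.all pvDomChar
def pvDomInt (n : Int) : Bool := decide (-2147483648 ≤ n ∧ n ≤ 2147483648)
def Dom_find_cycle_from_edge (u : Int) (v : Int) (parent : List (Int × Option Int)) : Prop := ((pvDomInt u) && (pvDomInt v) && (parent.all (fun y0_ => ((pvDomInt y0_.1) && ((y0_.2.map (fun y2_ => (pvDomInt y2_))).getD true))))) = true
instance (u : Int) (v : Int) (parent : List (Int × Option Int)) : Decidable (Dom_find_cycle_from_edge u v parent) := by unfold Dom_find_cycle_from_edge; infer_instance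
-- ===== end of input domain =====

-- B finds the LCA by two-pointer depth equalization (measure both depths, lift the deeper
-- endpoint, advance both pointers in lockstep until they coincide) instead of A's
-- materialized root paths with a set membership scan; no path lists or set are built.

-- parent is a Python dict: lookup is first match (none = KeyError)
def pvLook (parent : List (Int × Option Int)) (c : Int) : Option (Option Int) :=
  (parent.find? (fun p => p.1 == c)).map (·.2)

-- ===== PORT A =====
-- 'while current is not None: append; current = parent[current]' (fuel |parent|+1 always
-- suffices: a longer chain revisits a key and the Python loop never terminates — see Pre_)
def fcfeA_walk (parent : List (Int × Option Int)) : Nat → Option Int → List Int → List Int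
  | 0, _, acc => acc
  | _ + 1, none, acc => acc
  | f + 1, some c, acc =>
    match pvLook parent c with
    | none => acc          -- KeyError (outside Pre_)
    | some p => fcfeA_walk parent f p (acc ++ [c])

-- 'while current != lca: append; current = parent[current]'
def fcfeA_until (parent : List (Int × Option Int)) (lca : Option Int) :
    Nat → Option Int → List Int → List Int
  | 0, _, acc => acc
  | f + 1, cur, acc =>
    if cur == lca then acc
    else
      match cur with
      | none => acc        -- parent[None]: KeyError (outside Pre_)
      | some c =>
        match pvLook parent c with
        | none => acc      -- KeyError (outside Pre_)
        | some p => fcfeA_until parent lca f p (acc ++ [c])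

def find_cycle_from_edge (u : Int) (v : Int) (parent : List (Int × Option Int)) : List Int :=
  let fuel := parent.length + 1
  let path_u := fcfeA_walk parent fuel (some u) []
  let path_v := fcfeA_walk parent fuel (some v) []
  let set_u := PySem.Set.ofList path_u
  -- 'for node in path_v: if node in set_u: lca = node; break'
  let lca : Option Int := path_v.find? (fun n => PySem.Set.contains set_u n)
  let cycle := fcfeA_until parent lca fuel (some u) []
  -- 'cycle.append(lca)' — with lca = None the Python list is no longer a list of ints (outside Pre_)
  let cycle := match lca with | some x => cycle ++ [x] | none => cycle
  let path_v_to_lca := fcfeA_until parent lca fuel (some v) []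
  cycle ++ path_v_to_lca.reverse

-- ===== PORT B =====
-- 'd = 0; while x is not None: d += 1; x = parent[x]'
def fcfeB_depth (parent : List (Int × Option Int)) : Nat → Option Int → Int
  | 0, _ => 0
  | _ + 1, none => 0
  | f + 1, some c =>
    match pvLook parent c with
    | none => 0            -- KeyError (outside Pre_)
    | some p => 1 + fcfeB_depth parent f p

-- 'for _ in range(n): a = parent[a]'
def fcfeB_lift (parent : List (Int × Option Int)) : Nat → Option Int → Option Int
  | 0, a => a
  | n + 1, a =>
    match a with
    | none => none         -- parent[None]: KeyError (outside Pre_)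
    | some c =>
      match pvLook parent c with
      | none => some c     -- KeyError (outside Pre_)
      | some p => fcfeB_lift parent n p

-- 'while a != b: a = parent[a]; b = parent[b]'; result is the final a (= lca)
def fcfeB_meet (parent : List (Int × Option Int)) : Nat → Option Int → Option Int → Option Int
  | 0, a, _ => a
  | g + 1, a, b =>
    if a == b then a
    else
      match a, b with
      | some x, some y =>
        match pvLook parent x, pvLook parent y with
        | some p, some q => fcfeB_meet parent g p q
        | _, _ => a        -- KeyError (outside Pre_)
      | _, _ => a          -- parent[None]: KeyError (outside Pre_)

-- 'while cur != lca: append; cur = parent[cur]', building the list front-to-back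
def fcfeB_collect (parent : List (Int × Option Int)) (lca : Option Int) :
    Nat → Option Int → List Int
  | 0, _ => []
  | f + 1, cur =>
    if cur == lca then []
    else
      match cur with
      | none => []         -- parent[None]: KeyError (outside Pre_)
      | some c =>
        match pvLook parent c with
        | none => []       -- KeyError (outside Pre_)
        | some p => c :: fcfeB_collect parent lca f p

def find_cycle_from_edge_alt (u : Int) (v : Int) (parent : List (Int × Option Int)) : List Int :=
  let fuel := parent.length + 1
  let du := fcfeB_depth parent fuel (some u)
  let dv := fcfeB_depth parent fuel (some v)
  let a := fcfeB_lift parent (du - dv).toNat (some u)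
  let b := fcfeB_lift parent (dv - du).toNat (some v)
  let lca := fcfeB_meet parent fuel a b
  let left := fcfeB_collect parent lca fuel (some u)
  -- 'left + [lca]' — with lca = None the Python list is no longer a list of ints (outside Pre_)
  let left := match lca with | some x => left ++ [x] | none => left
  let right := fcfeB_collect parent lca fuel (some v)
  left ++ right.reverse

-- ===== PRECONDITION & SPEC =====
-- pvChain parent f cur = the parent chain from cur down to a root (some path), or none if a
-- lookup fails (KeyError) or the chain is longer than f.  With f = |parent| + 1 this is EXACT:
-- a chain of more than |parent| nodes must revisit a key, so the Python while-loop never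
-- terminates there.  So Pre_ states a property of the input graph only: the parent chains
-- from u and from v both reach a root, and the two chains share a node (otherwise A's result
-- contains None, not an int).
def pvChain (parent : List (Int × Option Int)) : Nat → Option Int → Option (List Int)
  | _, none => some []
  | 0, some _ => none
  | f + 1, some c =>
    match pvLook parent c with
    | none => none
    | some p => (pvChain parent f p).map (c :: ·)

-- Pre_ excludes: (a) inputs where a parent lookup raises KeyError or the chain cycles (A loops
-- forever), and (b) disconnected u,v, where A (and B) returns a list containing None (not a List Int).
def Pre_find_cycle_from_edge (u : Int) (v : Int) (parent : List (Int × Option Int)) : Prop :=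
  (pvChain parent (parent.length + 1) (some u)).isSome = true ∧
  (pvChain parent (parent.length + 1) (some v)).isSome = true ∧
  (((pvChain parent (parent.length + 1) (some v)).getD []).any
    (fun x => ((pvChain parent (parent.length + 1) (some u)).getD []).contains x)) = true

instance (u : Int) (v : Int) (parent : List (Int × Option Int)) :
    Decidable (Pre_find_cycle_from_edge u v parent) := by
  unfold Pre_find_cycle_from_edge; infer_instance

def pvWitness_find_cycle_from_edge : Int × Int × (List (Int × Option Int)) :=
  (0, 1, [(0, none), (1, some 0)])

def Spec_find_cycle_from_edge (u : Int) (v : Int) (parent : List (Int × Option Int)) (out : List Int) : Prop := out = find_cycle_from_edge_alt u v parent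
instance (u : Int) (v : Int) (parent : List (Int × Option Int)) (out : List Int) : Decidable (Spec_find_cycle_from_edge u v parent out) := by unfold Spec_find_cycle_from_edge; infer_instance

-- ===== CLAIM (what is proved, stated in full; the proofs are below) =====
def Claim_equal_find_cycle_from_edge : Prop := ∀ (u : Int) (v : Int) (parent : List (Int × Option Int)), Dom_find_cycle_from_edge u v parent → Pre_find_cycle_from_edge u v parent → Spec_find_cycle_from_edge u v parent (find_cycle_from_edge u v parent)

-- ===== LEMMAS AND PROOFS =====

theorem pvChain_mono (parent : List (Int × Option Int)) :
    ∀ (f : Nat) (cur : Option Int) (L : List Int),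
      pvChain parent f cur = some L → pvChain parent (f + 1) cur = some L := by
  intro f
  induction f with
  | zero =>
    intro cur L h
    cases cur with
    | none => simpa [pvChain] using h
    | some c => simp [pvChain] at h
  | succ f ih =>
    intro cur L h
    cases cur with
    | none => simpa [pvChain] using h
    | some c =>
      cases hp : pvLook parent c with
      | none => simp [pvChain, hp] at h
      | some p =>
        simp [pvChain, hp] at h ⊢
        obtain ⟨L', hL', rfl⟩ := h
        exact ⟨L', ih p L' hL', rfl⟩

theorem pvChain_length_le (parent : List (Int × Option Int)) :
    ∀ (f : Nat) (cur : Option Int) (L : List Int),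
      pvChain parent f cur = some L → L.length ≤ f := by
  intro f
  induction f with
  | zero =>
    intro cur L h
    cases cur with
    | none => simp [pvChain] at h; subst h; simp
    | some c => simp [pvChain] at h
  | succ f ih =>
    intro cur L h
    cases cur with
    | none => simp [pvChain] at h; subst h; simp
    | some c =>
      cases hp : pvLook parent c with
      | none => simp [pvChain, hp] at h
      | some p =>
        simp [pvChain, hp] at h
        obtain ⟨L', hL', rfl⟩ := h
        have := ih p L' hL'
        simp; omega

-- every occurrence in a chain starts the chain's own suffix
theorem pvChain_suffix (parent : List (Int × Option Int)) :
    ∀ (f : Nat) (cur : Option Int) (L P Q : List Int) (x : Int),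
      pvChain parent f cur = some L → L = P ++ x :: Q →
      pvChain parent f (some x) = some (x :: Q) := by
  intro f
  induction f with
  | zero =>
    intro cur L P Q x h hL
    cases cur with
    | none => simp [pvChain] at h; subst h; simp at hL
    | some c => simp [pvChain] at h
  | succ f ih =>
    intro cur L P Q x h hL
    cases cur with
    | none => simp [pvChain] at h; subst h; simp at hL
    | some c =>
      cases hp : pvLook parent c with
      | none => simp [pvChain, hp] at h
      | some p =>
        simp [pvChain, hp] at h
        obtain ⟨L', hL', rfl⟩ := h
        cases P with
        | nil =>
          simp at hL
          obtain ⟨rfl, rfl⟩ := hL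
          simp [pvChain, hp, hL']
        | cons y P' =>
          simp at hL
          obtain ⟨rfl, hL2⟩ := hL
          exact pvChain_mono parent f _ _ (ih p L' P' Q x hL' hL2)

theorem fcfeA_walk_eq (parent : List (Int × Option Int)) :
    ∀ (f : Nat) (cur : Option Int) (L acc : List Int),
      pvChain parent f cur = some L → fcfeA_walk parent f cur acc = acc ++ L := by
  intro f
  induction f with
  | zero =>
    intro cur L acc h
    cases cur with
    | none => simp [pvChain] at h; subst h; simp [fcfeA_walk]
    | some c => simp [pvChain] at h
  | succ f ih =>
    intro cur L acc h
    cases cur with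
    | none => simp [pvChain] at h; subst h; simp [fcfeA_walk]
    | some c =>
      cases hp : pvLook parent c with
      | none => simp [pvChain, hp] at h
      | some p =>
        simp [pvChain, hp] at h
        obtain ⟨L', hL', rfl⟩ := h
        simp [fcfeA_walk, hp, ih p L' (acc ++ [c]) hL']

theorem fcfeA_until_eq (parent : List (Int × Option Int)) (x : Int) :
    ∀ (f : Nat) (cur : Option Int) (L acc : List Int),
      pvChain parent f cur = some L → x ∈ L →
      fcfeA_until parent (some x) f cur acc = acc ++ L.takeWhile (fun y => y != x) := by
  intro f
  induction f with
  | zero =>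
    intro cur L acc h hx
    cases cur with
    | none => simp [pvChain] at h; subst h; simp at hx
    | some c => simp [pvChain] at h
  | succ f ih =>
    intro cur L acc h hx
    cases cur with
    | none => simp [pvChain] at h; subst h; simp at hx
    | some c =>
      cases hp : pvLook parent c with
      | none => simp [pvChain, hp] at h
      | some p =>
        simp [pvChain, hp] at h
        obtain ⟨L', hL', rfl⟩ := h
        by_cases hcx : c = x
        · subst hcx
          simp [fcfeA_until, List.takeWhile]
        · have hx' : x ∈ L' := by
            rcases List.mem_cons.mp hx with h1 | h1
            · exact absurd h1.symm hcx
            · exact h1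
          have : ((some c : Option Int) == some x) = false := by
            simp [hcx]
          simp only [fcfeA_until, this, Bool.false_eq_true, if_false, hp]
          rw [ih p L' (acc ++ [c]) hL' hx']
          have hb : (c != x) = true := by simp [hcx]
          simp [List.takeWhile, hb]

theorem fcfeB_depth_eq (parent : List (Int × Option Int)) :
    ∀ (f : Nat) (cur : Option Int) (L : List Int),
      pvChain parent f cur = some L → fcfeB_depth parent f cur = (L.length : Int) := by
  intro f
  induction f with
  | zero =>
    intro cur L h
    cases cur with
    | none => simp [pvChain] at h; subst h; simp [fcfeB_depth]
    | some c => simp [pvChain] at h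
  | succ f ih =>
    intro cur L h
    cases cur with
    | none => simp [pvChain] at h; subst h; simp [fcfeB_depth]
    | some c =>
      cases hp : pvLook parent c with
      | none => simp [pvChain, hp] at h
      | some p =>
        simp [pvChain, hp] at h
        obtain ⟨L', hL', rfl⟩ := h
        simp [fcfeB_depth, hp, ih p L' hL']
        omega

theorem fcfeB_lift_eq (parent : List (Int × Option Int)) :
    ∀ (n : Nat) (f : Nat) (cur : Option Int) (L : List Int),
      pvChain parent f cur = some L → n ≤ L.length →
      pvChain parent f (fcfeB_lift parent n cur) = some (L.drop n) := by
  intro n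
  induction n with
  | zero => intro f cur L h _; simpa [fcfeB_lift] using h
  | succ n ih =>
    intro f cur L h hn
    cases cur with
    | none =>
      cases f with
      | zero => simp [pvChain] at h; subst h; simp at hn
      | succ f => simp [pvChain] at h; subst h; simp at hn
    | some c =>
      cases f with
      | zero => simp [pvChain] at h
      | succ f =>
        cases hp : pvLook parent c with
        | none => simp [pvChain, hp] at h
        | some p =>
          simp [pvChain, hp] at h
          obtain ⟨L', hL', rfl⟩ := h
          simp at hn
          have := ih f p L' hL' (by omega)
          simpa [fcfeB_lift, hp] using pvChain_mono parent f _ _ this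

theorem pvChain_cons (parent : List (Int × Option Int)) (f : Nat) (a : Option Int)
    (z : Int) (R : List Int) (h : pvChain parent f a = some (z :: R)) :
    a = some z ∧ ∃ f' p, f = f' + 1 ∧ pvLook parent z = some p ∧ pvChain parent f' p = some R := by
  cases a with
  | none => cases f <;> simp [pvChain] at h
  | some c =>
    cases f with
    | zero => simp [pvChain] at h
    | succ f =>
      cases hp : pvLook parent c with
      | none => simp [pvChain, hp] at h
      | some p =>
        simp [pvChain, hp] at h
        obtain ⟨hR, rfl⟩ := h
        exact ⟨rfl, f, p, rfl, hp, hR⟩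

theorem fcfeB_meet_eq (parent : List (Int × Option Int)) (T : List Int) (w : Int) :
    ∀ (P Q : List Int), List.Forall₂ (fun x y => x ≠ y) P Q →
      ∀ (F g : Nat) (a b : Option Int),
        pvChain parent F a = some (P ++ w :: T) →
        pvChain parent F b = some (Q ++ w :: T) →
        P.length + 1 ≤ g →
        fcfeB_meet parent g a b = some w := by
  intro P
  induction P with
  | nil =>
    intro Q hfa F g a b ha hb hg
    cases hfa
    obtain ⟨rfl, -⟩ := pvChain_cons parent F a w T (by simpa using ha)
    obtain ⟨rfl, -⟩ := pvChain_cons parent F b w T (by simpa using hb)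
    cases g with
    | zero => omega
    | succ g => simp [fcfeB_meet]
  | cons x P' ih =>
    intro Q hfa F g a b ha hb hg
    cases hfa with
    | cons hxy htail =>
      rename_i y Q'
      obtain ⟨rfl, F1, p, hF1, hpx, hchp⟩ := pvChain_cons parent F a x (P' ++ w :: T) (by simpa using ha)
      obtain ⟨rfl, F2, q, hF2, hpy, hchq⟩ := pvChain_cons parent F b y (Q' ++ w :: T) (by simpa using hb)
      have hFF : F2 = F1 := by omega
      subst hFF
      cases g with
      | zero => simp at hg
      | succ g =>
        have hne : ((some x : Option Int) == some y) = false := by simp [hxy]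
        simp only [fcfeB_meet, hne, Bool.false_eq_true, if_false, hpx, hpy]
        exact ih Q' htail F2 g p q hchp hchq (by simp at hg ⊢; omega)

theorem fcfeB_collect_eq (parent : List (Int × Option Int)) (x : Int) :
    ∀ (f : Nat) (cur : Option Int) (L : List Int),
      pvChain parent f cur = some L → x ∈ L →
      fcfeB_collect parent (some x) f cur = L.takeWhile (fun y => y != x) := by
  intro f
  induction f with
  | zero =>
    intro cur L h hx
    cases cur with
    | none => simp [pvChain] at h; subst h; simp at hx
    | some c => simp [pvChain] at h
  | succ f ih =>
    intro cur L h hx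
    cases cur with
    | none => simp [pvChain] at h; subst h; simp at hx
    | some c =>
      cases hp : pvLook parent c with
      | none => simp [pvChain, hp] at h
      | some p =>
        simp [pvChain, hp] at h
        obtain ⟨L', hL', rfl⟩ := h
        by_cases hcx : c = x
        · subst hcx
          simp [fcfeB_collect, List.takeWhile]
        · have hx' : x ∈ L' := by
            rcases List.mem_cons.mp hx with h1 | h1
            · exact absurd h1.symm hcx
            · exact h1
          have : ((some c : Option Int) == some x) = false := by simp [hcx]
          simp only [fcfeB_collect, this, Bool.false_eq_true, if_false, hp]
          have hb : (c != x) = true := by simp [hcx]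
          simp [List.takeWhile, hb, ih p L' hL' hx']

theorem forall2_ne_of_mem (pu : List Int) :
    ∀ (X Y : List Int), X.length = Y.length →
      (∀ x ∈ X, x ∈ pu) → (∀ y ∈ Y, y ∉ pu) →
      List.Forall₂ (fun x y => x ≠ y) X Y := by
  intro X
  induction X with
  | nil =>
    intro Y hl _ _
    cases Y with
    | nil => exact List.Forall₂.nil
    | cons y Y' => simp at hl
  | cons x X' ih =>
    intro Y hl hX hY
    cases Y with
    | nil => simp at hl
    | cons y Y' =>
      refine List.Forall₂.cons ?_ (ih Y' (by simpa using hl)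
        (fun z hz => hX z (List.mem_cons_of_mem _ hz))
        (fun z hz => hY z (List.mem_cons_of_mem _ hz)))
      intro hxy
      exact hY y (List.mem_cons_self) (hxy ▸ hX x List.mem_cons_self)

-- ===== VERDICT (by name: the statement is the Claim_ definition above) =====
theorem find_cycle_from_edge_spec : Claim_equal_find_cycle_from_edge := by
  intro u v parent _ hpre
  obtain ⟨h1, h2, h3⟩ := hpre
  obtain ⟨pu, hpu⟩ := Option.isSome_iff_exists.mp h1
  obtain ⟨pv, hpv⟩ := Option.isSome_iff_exists.mp h2
  rw [hpu, hpv] at h3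
  simp only [Option.getD_some] at h3
  obtain ⟨x0, hxv, hxu⟩ := List.any_eq_true.mp h3
  have hxmem : x0 ∈ pu := by simpa using hxu
  have hxsu : PySem.Set.contains (PySem.Set.ofList pu) x0 = true := by
    simp [PySem.Set.mem_ofList, hxmem]
  have hfs : (pv.find? (fun y => PySem.Set.contains (PySem.Set.ofList pu) y)).isSome :=
    List.find?_isSome.mpr ⟨x0, hxv, hxsu⟩
  obtain ⟨w, hw⟩ := Option.isSome_iff_exists.mp hfs
  -- split pv at its first node lying on pu
  obtain ⟨hwp, Qp, T, hpvsplit, hQp⟩ := List.find?_eq_some_iff_append.mp hw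
  have hwpu : w ∈ pu := by
    have := (PySem.Set.contains_iff _ w).mp hwp
    simpa [PySem.Set.mem_ofList] using this
  have hwpv : w ∈ pv := by rw [hpvsplit]; simp
  -- chains from w: the shared suffix
  obtain ⟨Pp, T', hpusplit⟩ := List.append_of_mem hwpu
  have hchw1 := pvChain_suffix parent (parent.length + 1) (some v) pv Qp T w hpv hpvsplit
  have hchw2 := pvChain_suffix parent (parent.length + 1) (some u) pu Pp T' w hpu hpusplit
  have hTT : T' = T := by
    rw [hchw1] at hchw2
    simpa using hchw2.symm
  rw [hTT] at hpusplit hchw2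
  clear hTT
  -- lengths
  have hlu : pu.length = Pp.length + (T.length + 1) := by rw [hpusplit]; simp
  have hlv : pv.length = Qp.length + (T.length + 1) := by rw [hpvsplit]; simp
  have hpuF := pvChain_length_le parent (parent.length + 1) (some u) pu hpu
  -- the lift amounts
  have hn1 : ((pu.length : Int) - (pv.length : Int)).toNat = pu.length - pv.length := by omega
  have hn2 : ((pv.length : Int) - (pu.length : Int)).toNat = pv.length - pu.length := by omega
  set n1 := pu.length - pv.length with hdefn1
  set n2 := pv.length - pu.length with hdefn2
  have hn1le : n1 ≤ Pp.length := by omega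
  have hn2le : n2 ≤ Qp.length := by omega
  -- chains after lifting
  have hla := fcfeB_lift_eq parent n1 (parent.length + 1) (some u) pu hpu (by omega)
  have hlb := fcfeB_lift_eq parent n2 (parent.length + 1) (some v) pv hpv (by omega)
  rw [hpusplit, List.drop_append_of_le_length hn1le] at hla
  rw [hpvsplit, List.drop_append_of_le_length hn2le] at hlb
  -- the trimmed prefixes disagree pointwise
  have hfa : List.Forall₂ (fun x y => x ≠ y) (Pp.drop n1) (Qp.drop n2) := by
    refine forall2_ne_of_mem pu _ _ (by simp [List.length_drop]; omega) ?_ ?_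
    · intro z hz
      rw [hpusplit]
      exact List.mem_append_left _ (List.mem_of_mem_drop hz)
    · intro z hz hzpu
      have hzQ : z ∈ Qp := List.mem_of_mem_drop hz
      have := hQp z hzQ
      simp [PySem.Set.mem_ofList] at this
      exact this hzpu
  -- the two-pointer walk meets exactly at w
  have hmeet := fcfeB_meet_eq parent T w _ _ hfa (parent.length + 1) (parent.length + 1)
    _ _ hla hlb (by simp [List.length_drop]; omega)
  -- loop characterizations
  have hAwu := fcfeA_walk_eq parent (parent.length + 1) (some u) pu [] hpu
  have hAwv := fcfeA_walk_eq parent (parent.length + 1) (some v) pv [] hpv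
  have hAuu := fcfeA_until_eq parent w (parent.length + 1) (some u) pu [] hpu hwpu
  have hAuv := fcfeA_until_eq parent w (parent.length + 1) (some v) pv [] hpv hwpv
  have hBdu := fcfeB_depth_eq parent (parent.length + 1) (some u) pu hpu
  have hBdv := fcfeB_depth_eq parent (parent.length + 1) (some v) pv hpv
  have hBcu := fcfeB_collect_eq parent w (parent.length + 1) (some u) pu hpu hwpu
  have hBcv := fcfeB_collect_eq parent w (parent.length + 1) (some v) pv hpv hwpv
  show find_cycle_from_edge u v parent = find_cycle_from_edge_alt u v parent
  unfold find_cycle_from_edge find_cycle_from_edge_alt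
  simp only [hAwu, hAwv, List.nil_append, hw, hAuu, hAuv,
    hBdu, hBdv, hn1, hn2, hmeet, hBcu, hBcv]
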